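-- pv_equiv track=rewrite | github.com/DanlanChen/Leetcode | find_target_in_2_sum.py | find_target_in_2sum
-- ===== SOURCE A (Python) =====
-- def find_target_in_2sum(arr, target):
--     arr = sorted(arr)
--     if len(arr) == 0:
--         return 1
--     two_sum = set()
--     for i in range(len(arr) - 1):
--         for j in range(i, len(arr)):
--             two_sum.add(arr[i] + arr[j])
--     two_sum = sorted(list(two_sum), reverse=True)
--     for i in range(len(two_sum)):
--         if two_sum[i] <= target:
--             return i+1
--         else:
--             continue
--     return len(two_sum) + 1
-- ===== SOURCE B (Python) =====
-- def find_target_in_2sum(arr, target):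
--     arr = sorted(arr)
--     sums = {arr[i] + arr[j] for i in range(len(arr) - 1) for j in range(i, len(arr))}
--     return sum(1 for s in sums if s > target) + 1
-- ===== Notes on version B (the rewrite author's own statement) =====
-- stated objective: simpler
-- what changed: B keeps the pair-sum set construction but eliminates the descending sort of the set and the indexed early-return rank scan, computing the rank directly as the count of distinct sums strictly greater than target plus one; the separate empty-array check also disappears.
import Mathlib
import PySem

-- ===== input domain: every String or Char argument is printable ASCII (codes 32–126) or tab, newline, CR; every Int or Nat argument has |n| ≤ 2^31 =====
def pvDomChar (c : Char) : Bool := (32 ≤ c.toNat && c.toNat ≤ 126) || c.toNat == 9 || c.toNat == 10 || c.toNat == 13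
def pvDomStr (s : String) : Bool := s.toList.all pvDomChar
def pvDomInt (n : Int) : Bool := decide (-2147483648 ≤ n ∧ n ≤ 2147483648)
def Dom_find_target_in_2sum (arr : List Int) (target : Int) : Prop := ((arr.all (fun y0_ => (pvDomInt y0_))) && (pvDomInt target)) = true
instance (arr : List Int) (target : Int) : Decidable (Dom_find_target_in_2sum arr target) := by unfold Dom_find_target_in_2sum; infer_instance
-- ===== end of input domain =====

-- B replaces the descending sort of the sum set and the rank-finding scan by a direct count
-- of the distinct sums strictly greater than target, plus one (objective: simpler).

-- ===== PORT A =====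
-- the indexed scan 'for i in range(len(two_sum)): if two_sum[i] <= target: return i+1' / 'return len+1'
def pvScanA (target : Int) : List Int → Int → Int
  | [], i => i + 1
  | t :: rest, i => if t ≤ target then i + 1 else pvScanA target rest (i + 1)

def find_target_in_2sum (arr0 : List Int) (target : Int) : Int :=
  let arr := PySem.List.sorted arr0 (fun x => x) false
  if arr.length = 0 then 1
  else
    let two_sum : PySem.Set Int :=
      (PySem.List.pyRange 0 ((arr.length : Int) - 1) 1).foldl (fun acc i =>
        (PySem.List.pyRange i (arr.length : Int) 1).foldl (fun acc2 j =>
          PySem.Set.add acc2 (PySem.List.pyGetD arr i 0 + PySem.List.pyGetD arr j 0)) acc)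
        PySem.Set.empty
    let ts := PySem.List.sorted two_sum (fun x => x) true
    pvScanA target ts 0

-- ===== PORT B =====
def find_target_in_2sum_alt (arr0 : List Int) (target : Int) : Int :=
  let arr := PySem.List.sorted arr0 (fun x => x) false
  let sums : PySem.Set Int := PySem.Set.ofList
    ((PySem.List.pyRange 0 ((arr.length : Int) - 1) 1).flatMap (fun i =>
      (PySem.List.pyRange i (arr.length : Int) 1).map (fun j =>
        PySem.List.pyGetD arr i 0 + PySem.List.pyGetD arr j 0)))
  ((sums.filter (fun s => target < s)).length : Int) + 1

-- ===== PRECONDITION & SPEC =====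
def Spec_find_target_in_2sum (arr : List Int) (target : Int) (out : Int) : Prop := out = find_target_in_2sum_alt arr target
instance (arr : List Int) (target : Int) (out : Int) : Decidable (Spec_find_target_in_2sum arr target out) := by unfold Spec_find_target_in_2sum; infer_instance

-- ===== CLAIM (what is proved, stated in full; the proofs are below) =====
def Claim_equal_find_target_in_2sum : Prop := ∀ (arr : List Int) (target : Int), Dom_find_target_in_2sum arr target → Spec_find_target_in_2sum arr target (find_target_in_2sum arr target)

-- ===== LEMMAS AND PROOFS =====

-- membership in a fold of Set.add
theorem pv_mem_foldl_add {β : Type} (f : β → Int) (l : List β) (init : PySem.Set Int) (x : Int) :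
    x ∈ l.foldl (fun acc b => PySem.Set.add acc (f b)) init ↔ x ∈ init ∨ ∃ b ∈ l, x = f b := by
  induction l generalizing init with
  | nil => simp
  | cons b t ih =>
      simp only [List.foldl_cons, ih, PySem.Set.mem_add, List.mem_cons]
      constructor
      · rintro (⟨h | h⟩ | ⟨c, hc, rfl⟩)
        · exact Or.inl h
        · exact Or.inr ⟨b, Or.inl rfl, h⟩
        · exact Or.inr ⟨c, Or.inr hc, rfl⟩
      · rintro (h | ⟨c, (rfl | hc), rfl⟩)
        · exact Or.inl (Or.inl h)
        · exact Or.inl (Or.inr rfl)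
        · exact Or.inr ⟨c, hc, rfl⟩

-- nodup of a fold of Set.add
theorem pv_nodup_foldl_add {β : Type} (f : β → Int) (l : List β) (init : PySem.Set Int)
    (h : init.Nodup) : (l.foldl (fun acc b => PySem.Set.add acc (f b)) init).Nodup := by
  induction l generalizing init with
  | nil => exact h
  | cons b t ih => exact ih _ (PySem.Set.nodup_add _ _ h)

-- membership in A's nested fold of Set.add
theorem pv_mem_foldl_foldl_add (l : List Int) (g : Int → List Int) (f : Int → Int → Int)
    (init : PySem.Set Int) (x : Int) :
    x ∈ l.foldl (fun acc i => (g i).foldl (fun a j => PySem.Set.add a (f i j)) acc) init ↔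
      x ∈ init ∨ ∃ i ∈ l, ∃ j ∈ g i, x = f i j := by
  induction l generalizing init with
  | nil => simp
  | cons b t ih =>
      simp only [List.foldl_cons, ih, pv_mem_foldl_add, List.mem_cons]
      constructor
      · rintro (⟨h | ⟨j, hj, rfl⟩⟩ | ⟨c, hc, j, hj, rfl⟩)
        · exact Or.inl h
        · exact Or.inr ⟨b, Or.inl rfl, j, hj, rfl⟩
        · exact Or.inr ⟨c, Or.inr hc, j, hj, rfl⟩
      · rintro (h | ⟨c, (rfl | hc), j, hj, rfl⟩)
        · exact Or.inl (Or.inl h)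
        · exact Or.inl (Or.inr ⟨j, hj, rfl⟩)
        · exact Or.inr ⟨c, hc, j, hj, rfl⟩

-- nodup of A's nested fold
theorem pv_nodup_foldl_foldl_add (l : List Int) (g : Int → List Int) (f : Int → Int → Int)
    (init : PySem.Set Int) (h : init.Nodup) :
    (l.foldl (fun acc i => (g i).foldl (fun a j => PySem.Set.add a (f i j)) acc) init).Nodup := by
  induction l generalizing init with
  | nil => exact h
  | cons b t ih => exact ih _ (pv_nodup_foldl_add _ _ _ h)

-- the indexed early-return scan over a strictly descending list counts the elements > target
theorem pv_scan (target : Int) (ts : List Int) (h : ts.Pairwise (fun a b => b < a)) :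
    ∀ i : Int, pvScanA target ts i = i + ((ts.filter (fun t => target < t)).length : Int) + 1 := by
  induction ts with
  | nil => intro i; simp [pvScanA]
  | cons t rest ih =>
      intro i
      rw [List.pairwise_cons] at h
      by_cases hle : t ≤ target
      · have hrest : rest.filter (fun t => decide (target < t)) = [] := by
          rw [List.filter_eq_nil_iff]
          intro r hr
          have : r < t := h.1 r hr
          simp; omega
        simp [pvScanA, hle, hrest, show ¬ (target < t) by omega]
      · have := ih h.2 (i + 1)
        simp only [pvScanA, if_neg hle, this, List.filter_cons,
          show decide (target < t) = true by simp; omega, if_pos, List.length_cons]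
        push_cast
        ring

-- ===== VERDICT (by name: the statement is the Claim_ definition above) =====
theorem find_target_in_2sum_spec : Claim_equal_find_target_in_2sum := by
  intro arr0 target _
  unfold Spec_find_target_in_2sum
  match arr0 with
  | [] => rfl
  | a :: rest =>
    simp only [find_target_in_2sum, find_target_in_2sum_alt]
    set arr := PySem.List.sorted (a :: rest) (fun x => x) false with harr
    have hlen : arr.length = rest.length + 1 :=
      (PySem.List.sorted_perm (a :: rest) _ _).length_eq
    rw [if_neg (by omega)]
    set f : Int → Int → Int :=
      fun i j => PySem.List.pyGetD arr i 0 + PySem.List.pyGetD arr j 0 with hf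
    set SA : PySem.Set Int :=
      (PySem.List.pyRange 0 ((arr.length : Int) - 1) 1).foldl (fun acc i =>
        (PySem.List.pyRange i (arr.length : Int) 1).foldl (fun acc2 j =>
          PySem.Set.add acc2 (f i j)) acc) PySem.Set.empty with hSA
    set L := (PySem.List.pyRange 0 ((arr.length : Int) - 1) 1).flatMap (fun i =>
      (PySem.List.pyRange i (arr.length : Int) 1).map (fun j => f i j)) with hL
    have hNA : SA.Nodup := pv_nodup_foldl_foldl_add _ _ _ _ List.nodup_nil
    have hNB : (PySem.Set.ofList L).Nodup := PySem.Set.nodup_ofList L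
    have hmem : ∀ x, x ∈ SA ↔ x ∈ PySem.Set.ofList L := by
      intro x
      rw [hSA, pv_mem_foldl_foldl_add, PySem.Set.mem_ofList, hL, List.mem_flatMap]
      have hempty : x ∉ (PySem.Set.empty : PySem.Set Int) := List.not_mem_nil
      simp only [hempty, false_or, List.mem_map]
      constructor
      · rintro ⟨i, hi, j, hj, rfl⟩; exact ⟨i, hi, j, hj, rfl⟩
      · rintro ⟨i, hi, j, hj, rfl⟩; exact ⟨i, hi, j, hj, rfl⟩
    have hperm : SA.Perm (PySem.Set.ofList L) :=
      (List.perm_ext_iff_of_nodup hNA hNB).mpr hmem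
    have htsperm : (PySem.List.sorted SA (fun x => x) true).Perm SA :=
      PySem.List.sorted_perm SA _ _
    have htspair : (PySem.List.sorted SA (fun x => x) true).Pairwise (fun a b => b < a) := by
      have hrev := PySem.List.sorted_pairwise_rev SA (fun x => x)
      have hnd : (PySem.List.sorted SA (fun x => x) true).Nodup := htsperm.nodup_iff.mpr hNA
      exact (hrev.and hnd).imp (fun h => lt_of_le_of_ne h.1 (Ne.symm h.2))
    rw [pv_scan target _ htspair 0]
    have hpf : ((PySem.List.sorted SA (fun x => x) true).filter
          (fun t => decide (target < t))).Perm
        ((PySem.Set.ofList L).filter (fun t => decide (target < t))) :=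
      (htsperm.trans hperm).filter _
    rw [hpf.length_eq]
    ring
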